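-- pv_equiv track=rewrite | github.com/Thelostcircuit/AdventOfCode | 2022/Day-1/main-1.py | make_list_totals
-- ===== SOURCE A (Python) =====
-- def make_list_totals(data):
--     total = 0
--     total_list = []
--     for x in data:
--         if x != '':
--             total = total + int(x)
--         else:
--             total_list.append(total)
--             total = 0
--     return total_list
-- ===== SOURCE B (Python) =====
-- def make_list_totals(data):
--     groups = []
--     current = []
--     for x in data:
--         if x == '':
--             groups.append(current)
--             current = []
--         else:
--             current.append(int(x))
--     return [sum(g) for g in groups]
-- ===== Notes on version B (the rewrite author's own statement) =====
-- stated objective: alternative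
-- what changed: B first partitions the input into groups of parsed ints (one group per empty-string separator, trailing run discarded) and then sums each group with a comprehension, instead of A's single pass with a running total accumulator.
import Mathlib
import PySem

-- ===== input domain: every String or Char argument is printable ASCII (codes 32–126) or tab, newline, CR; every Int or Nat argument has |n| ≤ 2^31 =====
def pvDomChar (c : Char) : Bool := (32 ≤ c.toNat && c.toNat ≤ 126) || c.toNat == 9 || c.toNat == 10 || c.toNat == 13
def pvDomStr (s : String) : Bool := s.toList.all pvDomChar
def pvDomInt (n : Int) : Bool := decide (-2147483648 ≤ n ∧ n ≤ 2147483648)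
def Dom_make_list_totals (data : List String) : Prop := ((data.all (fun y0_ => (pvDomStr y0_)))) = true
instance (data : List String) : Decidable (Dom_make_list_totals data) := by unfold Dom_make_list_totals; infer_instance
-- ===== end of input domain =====

-- B partitions the input into groups of parsed ints and sums each group, instead of A's running-total single pass; objective: alternative decomposition.


-- ===== PORT A =====
-- single pass with accumulator (total, total_list); int(x) = PySem.Int.ofStr?, Pre_ guarantees it parses
def make_list_totals (data : List String) : List Int :=
  (data.foldl (fun (st : Int × List Int) x =>
      if x ≠ "" then (st.1 + (PySem.Int.ofStr? x).getD 0, st.2)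
      else (0, st.2 ++ [st.1])) (0, [])).2

-- ===== PORT B =====
-- first pass: partition into (groups, current); then sum each group
def pvGroupsB (data : List String) : List (List Int) × List Int :=
  data.foldl (fun (st : List (List Int) × List Int) x =>
      if x = "" then (st.1 ++ [st.2], [])
      else (st.1, st.2 ++ [(PySem.Int.ofStr? x).getD 0])) ([], [])

def make_list_totals_alt (data : List String) : List Int :=
  (pvGroupsB data).1.map (fun g => g.sum)

-- ===== PRECONDITION & SPEC =====
-- Pre_ excludes exactly the inputs on which A raises ValueError: a non-empty string that int() cannot parse.
def Pre_make_list_totals (data : List String) : Prop :=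
  (data.all (fun x => x == "" || (PySem.Int.ofStr? x).isSome)) = true
instance (data : List String) : Decidable (Pre_make_list_totals data) := by
  unfold Pre_make_list_totals; infer_instance

def pvWitness_make_list_totals : List String := ["1", "2", "", "3"]

def Spec_make_list_totals (data : List String) (out : List Int) : Prop := out = make_list_totals_alt data
instance (data : List String) (out : List Int) : Decidable (Spec_make_list_totals data out) := by unfold Spec_make_list_totals; infer_instance

-- ===== CLAIM (what is proved, stated in full; the proofs are below) =====
def Claim_equal_make_list_totals : Prop := ∀ (data : List String), Dom_make_list_totals data → Pre_make_list_totals data → Spec_make_list_totals data (make_list_totals data)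

-- ===== LEMMAS AND PROOFS =====

-- invariant: A's (total, list) state corresponds to B's (groups, current) via list = map sum groups, total = sum current
theorem pv_inv (data : List String) :
    ∀ (gs : List (List Int)) (cur : List Int),
      (data.foldl (fun (st : Int × List Int) x =>
          if x ≠ "" then (st.1 + (PySem.Int.ofStr? x).getD 0, st.2)
          else (0, st.2 ++ [st.1])) (cur.sum, gs.map (fun g => g.sum))).2
      = ((data.foldl (fun (st : List (List Int) × List Int) x =>
            if x = "" then (st.1 ++ [st.2], [])
            else (st.1, st.2 ++ [(PySem.Int.ofStr? x).getD 0])) (gs, cur)).1).map (fun g => g.sum) := by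
  induction data with
  | nil => intro gs cur; simp
  | cons x xs ih =>
    intro gs cur
    by_cases hx : x = ""
    · subst hx
      simpa using ih (gs ++ [cur]) []
    · have h1 : (cur.sum + (PySem.Int.ofStr? x).getD 0)
          = (cur ++ [(PySem.Int.ofStr? x).getD 0]).sum := by simp
      simp only [List.foldl_cons]
      rw [if_pos hx, if_neg hx, h1]
      exact ih gs (cur ++ [(PySem.Int.ofStr? x).getD 0])

-- ===== VERDICT (by name: the statement is the Claim_ definition above) =====
theorem make_list_totals_spec : Claim_equal_make_list_totals := by
  intro data _ _
  unfold Spec_make_list_totals make_list_totals make_list_totals_alt pvGroupsB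
  simpa using pv_inv data [] []
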